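-- pv_equiv track=rewrite | github.com/ClaudioJansen/FPAA_MaxMin_Select | main.py | maxmin_select
-- ===== SOURCE A (Python) =====
-- def maxmin_select(arr, left, right):
--     """
--     Função recursiva que retorna uma tupla (mínimo, máximo)
--     para o subvetor arr[left:right+1] utilizando a técnica de divisão e conquista.
--     """
--     if left == right:
--         return arr[left], arr[left]
--     elif right == left + 1:
--         if arr[left] < arr[right]:
--             return arr[left], arr[right]
--         else:
--             return arr[right], arr[left]
--     else:
--         mid = (left + right) // 2
--         min1, max1 = maxmin_select(arr, left, mid)
--         min2, max2 = maxmin_select(arr, mid + 1, right)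
--         overall_min = min(min1, min2)
--         overall_max = max(max1, max2)
--         return overall_min, overall_max
-- ===== SOURCE B (Python) =====
-- def maxmin_select(arr, left, right):
--     lo = hi = arr[left]
--     for i in range(left + 1, right + 1):
--         v = arr[i]
--         if v < lo:
--             lo = v
--         elif v > hi:
--             hi = v
--     return lo, hi
-- ===== Notes on version B (the rewrite author's own statement) =====
-- stated objective: idiomatic
-- what changed: Replaces the divide-and-conquer recursion with a single iterative left-to-right scan that maintains running min and max.
import Mathlib
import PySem

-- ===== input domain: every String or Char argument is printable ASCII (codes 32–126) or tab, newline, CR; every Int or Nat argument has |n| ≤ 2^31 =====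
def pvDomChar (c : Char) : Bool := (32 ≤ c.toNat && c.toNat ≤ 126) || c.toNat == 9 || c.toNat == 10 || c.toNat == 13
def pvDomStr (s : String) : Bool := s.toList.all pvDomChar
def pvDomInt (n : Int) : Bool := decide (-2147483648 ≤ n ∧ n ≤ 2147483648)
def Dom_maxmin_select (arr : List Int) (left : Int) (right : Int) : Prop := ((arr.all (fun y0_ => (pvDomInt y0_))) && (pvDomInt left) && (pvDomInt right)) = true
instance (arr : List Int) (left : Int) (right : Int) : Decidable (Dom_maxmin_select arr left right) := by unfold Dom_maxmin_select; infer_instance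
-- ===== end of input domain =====

-- B replaces A's divide-and-conquer recursion with a single iterative scan keeping
-- running min/max; equivalence is proved on all inputs where the Python A returns
-- (left ≤ right and both endpoints valid Python indices, negative wraparound included).

-- ===== PORT A =====
-- arr[i] with Python negative-index semantics; default 0 is never reached inside Pre_.
def pvIdx (arr : List Int) (i : Int) : Int := PySem.List.pyGetD arr i 0

-- literal recursion of A, with fuel for totality (fuel never runs out inside Pre_,
-- since each recursive call strictly shrinks right-left).
def maxminA (arr : List Int) (left : Int) (right : Int) : Nat → Int × Int
  | 0 => (0, 0)
  | fuel + 1 =>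
    if left = right then (pvIdx arr left, pvIdx arr left)
    else if right = left + 1 then
      if pvIdx arr left < pvIdx arr right then (pvIdx arr left, pvIdx arr right)
      else (pvIdx arr right, pvIdx arr left)
    else
      let mid := PySem.Int.floordiv (left + right) 2
      let r1 := maxminA arr left mid fuel
      let r2 := maxminA arr (mid + 1) right fuel
      (min r1.1 r2.1, max r1.2 r2.2)

def maxmin_select (arr : List Int) (left : Int) (right : Int) : Int × Int :=
  maxminA arr left right ((right - left).toNat + 1)

-- ===== PORT B =====
def maxmin_select_alt (arr : List Int) (left : Int) (right : Int) : Int × Int :=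
  (PySem.List.pyRange (left + 1) (right + 1) 1).foldl
    (fun s i =>
      let v := pvIdx arr i
      if v < s.1 then (v, s.2) else if v > s.2 then (s.1, v) else s)
    (pvIdx arr left, pvIdx arr left)

-- ===== PRECONDITION & SPEC =====
-- Pre_ is exactly where the Python A returns: left ≤ right (otherwise A recurses forever)
-- and both endpoints are valid Python indices (otherwise IndexError).
def Pre_maxmin_select (arr : List Int) (left : Int) (right : Int) : Prop :=
  left ≤ right ∧ -(arr.length : Int) ≤ left ∧ right < (arr.length : Int)
instance (arr : List Int) (left : Int) (right : Int) : Decidable (Pre_maxmin_select arr left right) := by unfold Pre_maxmin_select; infer_instance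

def pvWitness_maxmin_select : List Int × Int × Int := ([3, 1, 4, 1, 5], 1, 4)

def Spec_maxmin_select (arr : List Int) (left : Int) (right : Int) (out : Int × Int) : Prop := out = maxmin_select_alt arr left right
instance (arr : List Int) (left : Int) (right : Int) (out : Int × Int) : Decidable (Spec_maxmin_select arr left right out) := by unfold Spec_maxmin_select; infer_instance

-- ===== CLAIM (what is proved, stated in full; the proofs are below) =====
def Claim_equal_maxmin_select : Prop := ∀ (arr : List Int) (left : Int) (right : Int), Dom_maxmin_select arr left right → Pre_maxmin_select arr left right → Spec_maxmin_select arr left right (maxmin_select arr left right)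

-- ===== LEMMAS AND PROOFS =====

-- the scan from a state (lo, hi) with lo ≤ hi computes running foldl-min and foldl-max
theorem scan_eq_foldl (arr : List Int) (idxs : List Int) (lo hi : Int) (h : lo ≤ hi) :
    idxs.foldl
      (fun s i =>
        let v := pvIdx arr i
        if v < s.1 then (v, s.2) else if v > s.2 then (s.1, v) else s)
      (lo, hi)
    = ((idxs.map (pvIdx arr)).foldl min lo, (idxs.map (pvIdx arr)).foldl max hi) := by
  induction idxs generalizing lo hi with
  | nil => simp
  | cons i t ih =>
    simp only [List.foldl_cons, List.map_cons]
    set v := pvIdx arr i with hv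
    by_cases h1 : v < lo
    · simp only [if_pos h1]
      rw [ih v hi (le_trans (le_of_lt h1) h)]
      congr 1
      · congr 1; omega
      · congr 1; omega
    · simp only [if_neg h1]
      by_cases h2 : v > hi
      · simp only [if_pos h2]
        rw [ih lo v (by omega)]
        congr 1
        · congr 1; omega
        · congr 1; omega
      · simp only [if_neg h2]
        rw [ih lo hi h]
        congr 1
        · congr 1; omega
        · congr 1; omega

theorem foldl_min_start (a b : Int) (l : List Int) :
    l.foldl min (min a b) = min a (l.foldl min b) := by
  induction l generalizing b with
  | nil => simp
  | cons x t ih => simp only [List.foldl_cons, min_assoc, ih]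

theorem foldl_max_start (a b : Int) (l : List Int) :
    l.foldl max (max a b) = max a (l.foldl max b) := by
  induction l generalizing b with
  | nil => simp
  | cons x t ih => simp only [List.foldl_cons, max_assoc, ih]

-- closed form of the B port, for left ≤ right
theorem alt_closed (arr : List Int) (left right : Int) (h : left ≤ right) :
    maxmin_select_alt arr left right =
      (((PySem.List.pyRange (left + 1) (right + 1) 1).map (pvIdx arr)).foldl min (pvIdx arr left),
       ((PySem.List.pyRange (left + 1) (right + 1) 1).map (pvIdx arr)).foldl max (pvIdx arr left)) := by
  unfold maxmin_select_alt
  exact scan_eq_foldl arr _ _ _ le_rfl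

-- merging two adjacent scans
theorem alt_merge (arr : List Int) (left mid right : Int)
    (h1 : left ≤ mid) (h2 : mid < right) :
    maxmin_select_alt arr left right =
      (min (maxmin_select_alt arr left mid).1 (maxmin_select_alt arr (mid + 1) right).1,
       max (maxmin_select_alt arr left mid).2 (maxmin_select_alt arr (mid + 1) right).2) := by
  rw [alt_closed arr left right (by omega), alt_closed arr left mid h1,
      alt_closed arr (mid + 1) right (by omega)]
  rw [PySem.List.pyRange_one_append (left + 1) (mid + 1) (right + 1) (by omega) (by omega)]
  rw [PySem.List.pyRange_one_cons (show mid + 1 < right + 1 by omega)]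
  simp only [List.map_append, List.foldl_append, List.map_cons, List.foldl_cons]
  rw [Prod.mk.injEq]
  exact ⟨foldl_min_start _ _ _, foldl_max_start _ _ _⟩

theorem maxminA_eq_alt (arr : List Int) :
    ∀ (fuel : Nat) (left right : Int), left ≤ right → (right - left).toNat < fuel →
      maxminA arr left right fuel = maxmin_select_alt arr left right := by
  intro fuel
  induction fuel with
  | zero => intro left right _ hf; omega
  | succ f ih =>
    intro left right hlr hf
    by_cases h1 : left = right
    · subst h1
      simp only [maxminA]
      rw [if_pos trivial]
      rw [alt_closed arr left left le_rfl]
      rw [PySem.List.pyRange_one_eq_nil (by omega)]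
      simp
    · by_cases h2 : right = left + 1
      · subst h2
        simp only [maxminA]
        rw [if_neg h1, if_pos trivial]
        rw [alt_closed arr left (left + 1) (by omega)]
        rw [PySem.List.pyRange_one_cons (show left + 1 < left + 1 + 1 by omega),
            PySem.List.pyRange_one_eq_nil (le_refl (left + 1 + 1))]
        simp only [List.map_cons, List.map_nil, List.foldl_cons, List.foldl_nil]
        by_cases h3 : pvIdx arr left < pvIdx arr (left + 1)
        · rw [if_pos h3]; rw [Prod.mk.injEq]; constructor <;> omega
        · rw [if_neg h3]; rw [Prod.mk.injEq]; constructor <;> omega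
      · have hmid := PySem.Int.floordiv_two_mid_bounds hlr
        have hmid2 : PySem.Int.floordiv (left + right) 2 < right := by
          have he : PySem.Int.floordiv (left + right) 2 = (left + right) / 2 :=
            PySem.Int.floordiv_eq_ediv_of_pos (by omega)
          omega
        simp only [maxminA]
        rw [if_neg h1, if_neg h2]
        set mid := PySem.Int.floordiv (left + right) 2 with hm
        rw [ih left mid hmid.1 (by omega), ih (mid + 1) right (by omega) (by omega)]
        exact (alt_merge arr left mid right hmid.1 hmid2).symm

-- ===== VERDICT (by name: the statement is the Claim_ definition above) =====
theorem maxmin_select_spec : Claim_equal_maxmin_select := by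
  intro arr left right _ hpre
  unfold Spec_maxmin_select maxmin_select
  exact maxminA_eq_alt arr _ left right hpre.1 (by omega)
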